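-- pv_equiv track=rewrite | github.com/TimS-ml/My-Algo | Educative/cp07-m_CircularArrayLoop.py | circular_array_loop_exists
-- ===== SOURCE A (Python) =====
-- def circular_array_loop_exists(nums):
--     L = len(nums)
--
--     # need to go over all the elements
--     for i in range(L):
--         linkLength = 0
--         j = i
--         forward = nums[j] > 0
--         while True:
--             if (forward and nums[j] < 0) or (not forward and nums[j] > 0):
--                 break
--             nextj = (j + nums[j] + L) % L
--             # break until we found first one
--             if nextj == j:
--                 break
--             j = nextj
--             linkLength += 1
--             if linkLength > L:
--                 return True
--     return False
-- ===== SOURCE B (Python) =====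
-- def circular_array_loop_exists(nums):
--     # marking pass: the visited set skips indices whose walk is already known
--     # to terminate; a revisit within the current path is a same-direction cycle.
--     L = len(nums)
--     visited = set()
--     for i in range(L):
--         if i in visited:
--             continue
--         forward = nums[i] > 0
--         path = set()
--         j = i
--         while True:
--             if j in path:
--                 return True
--             if j in visited:
--                 break
--             if (forward and nums[j] < 0) or (not forward and nums[j] > 0):
--                 break
--             nxt = (j + nums[j]) % L
--             if nxt == j:
--                 break
--             path.add(j)
--             visited.add(j)
--             j = nxt
--     return False
-- ===== Notes on version B (the rewrite author's own statement) =====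
-- stated objective: alternative
-- what changed: A restarts a fresh length-counting walk from every index; B instead makes one marking pass: a global visited set skips indices whose walk is already known to terminate, and a cycle is reported when the current walk revisits a node of its own path (no step counter).
import Mathlib
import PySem

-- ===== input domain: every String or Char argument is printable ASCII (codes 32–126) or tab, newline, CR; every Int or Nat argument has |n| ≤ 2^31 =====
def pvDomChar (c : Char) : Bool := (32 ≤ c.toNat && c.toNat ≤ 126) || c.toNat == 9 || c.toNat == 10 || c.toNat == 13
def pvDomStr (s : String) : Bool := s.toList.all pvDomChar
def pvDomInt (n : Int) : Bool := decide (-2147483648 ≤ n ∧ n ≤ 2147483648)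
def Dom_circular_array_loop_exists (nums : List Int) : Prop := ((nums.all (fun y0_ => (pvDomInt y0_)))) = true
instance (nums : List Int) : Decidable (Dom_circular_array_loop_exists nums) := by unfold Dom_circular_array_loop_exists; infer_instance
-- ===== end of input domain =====

-- B detects the cycle by a different algorithm: one marking pass with a global
-- visited set (skipping indices whose walk is already known to terminate) and a
-- path set, reporting True on a revisit inside the current path, instead of A's
-- restart-from-every-index walks counted against len(nums). Return value only;
-- no argument is mutated.

-- nums[j]: every access in both programs is at an index j with 0 ≤ j < len(nums)
-- (starts come from range(len) and steps are taken mod len), so the access never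
-- raises; the .getD 0 default is unreachable.
def pvVal (nums : List Int) (j : Int) : Int := (PySem.List.pyGet? nums j).getD 0

-- ===== PORT A =====
-- inner 'while True' of A: at node j with linkLength steps taken so far;
-- terminates because the recursive call requires linkLength + 1 ≤ L
def pvAWalk (nums : List Int) (L : Int) (forward : Bool) (j : Int) (linkLength : Int) : Bool :=
  if (forward && decide (pvVal nums j < 0)) || (!forward && decide (0 < pvVal nums j)) then
    false
  else
    let nextj := PySem.Int.mod (j + pvVal nums j + L) L
    if nextj = j then false
    else if L < linkLength + 1 then true
    else pvAWalk nums L forward nextj (linkLength + 1)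
termination_by (L + 1 - linkLength).toNat
decreasing_by omega

def circular_array_loop_exists (nums : List Int) : Bool :=
  let L : Int := (nums.length : Int)
  (PySem.List.pyRange 0 L 1).any (fun i =>
    pvAWalk nums L (decide (0 < pvVal nums i)) i 0)

-- ===== PORT B =====
-- inner 'while True' of B: fuel only makes the recursion structural; B's Python
-- loop adds a fresh index to 'path' on every pass, so with the initial fuel
-- len(nums)+1 the fuel-0 branch is never reached (proved below).
def pvBWalk (nums : List Int) (L : Int) (forward : Bool) (visited path : PySem.Set Int)
    (j : Int) (fuel : Nat) : Bool × PySem.Set Int :=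
  match fuel with
  | 0 => (false, visited)
  | fuel + 1 =>
    if PySem.Set.contains path j then (true, visited)
    else if PySem.Set.contains visited j then (false, visited)
    else if (forward && decide (pvVal nums j < 0)) || (!forward && decide (0 < pvVal nums j)) then
      (false, visited)
    else
      let nxt := PySem.Int.mod (j + pvVal nums j) L
      if nxt = j then (false, visited)
      else pvBWalk nums L forward (PySem.Set.add visited j) (PySem.Set.add path j) nxt fuel

-- outer 'for i in range(L)' of B, threading the visited set, early True exit
def pvBOuter (nums : List Int) (L : Int) (is : List Int) (visited : PySem.Set Int) : Bool :=
  match is with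
  | [] => false
  | i :: rest =>
    if PySem.Set.contains visited i then pvBOuter nums L rest visited
    else
      let r := pvBWalk nums L (decide (0 < pvVal nums i)) visited PySem.Set.empty i (nums.length + 1)
      if r.1 then true else pvBOuter nums L rest r.2

def circular_array_loop_exists_alt (nums : List Int) : Bool :=
  let L : Int := (nums.length : Int)
  pvBOuter nums L (PySem.List.pyRange 0 L 1) PySem.Set.empty

-- ===== PRECONDITION & SPEC =====
def Spec_circular_array_loop_exists (nums : List Int) (out : Bool) : Prop := out = circular_array_loop_exists_alt nums
instance (nums : List Int) (out : Bool) : Decidable (Spec_circular_array_loop_exists nums out) := by unfold Spec_circular_array_loop_exists; infer_instance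

-- ===== CLAIM (what is proved, stated in full; the proofs are below) =====
def Claim_equal_circular_array_loop_exists : Prop := ∀ (nums : List Int), Dom_circular_array_loop_exists nums → Spec_circular_array_loop_exists nums (circular_array_loop_exists nums)

-- ===== LEMMAS AND PROOFS =====

-- The common mathematical object: the step function of the circular array and
-- the per-node "no break" predicate; both programs answer "is some node of the
-- array on a same-direction cycle".
def pvF (nums : List Int) (j : Int) : Int := PySem.Int.mod (j + pvVal nums j) (nums.length : Int)

def pvDir (nums : List Int) (j : Int) : Bool := decide (0 < pvVal nums j)

def pvOk (nums : List Int) (fw : Bool) (j : Int) : Prop :=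
  ((fw && decide (pvVal nums j < 0)) || (!fw && decide (0 < pvVal nums j))) = false ∧ pvF nums j ≠ j

def pvLiveF (nums : List Int) (fw : Bool) (j : Int) : Prop := ∀ m : Nat, pvOk nums fw ((pvF nums)^[m] j)

def pvDead (nums : List Int) (j : Int) : Prop := ¬ pvLiveF nums (pvDir nums j) j

def pvHasCycle (nums : List Int) : Prop :=
  ∃ (c : Int) (k : Nat), 0 ≤ c ∧ c < (nums.length : Int) ∧ 1 ≤ k ∧ (pvF nums)^[k] c = c ∧
    ∀ t < k, pvOk nums (pvDir nums c) ((pvF nums)^[t] c)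

theorem pvF_range (nums : List Int) (j : Int) (hn : 0 < nums.length) :
    0 ≤ pvF nums j ∧ pvF nums j < (nums.length : Int) := by
  unfold pvF
  rw [PySem.Int.mod_eq_emod_of_pos (by exact_mod_cast hn)]
  have hL : (0:Int) < (nums.length : Int) := by exact_mod_cast hn
  exact ⟨Int.emod_nonneg _ hL.ne', Int.emod_lt_of_pos _ hL⟩

theorem pvOk_dir (nums : List Int) (fw : Bool) (j : Int) (h0 : 0 ≤ j) (h1 : j < (nums.length : Int))
    (h : pvOk nums fw j) : pvDir nums j = fw := by
  obtain ⟨hs, hf⟩ := h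
  have hv : pvVal nums j ≠ 0 := by
    intro hv
    apply hf
    unfold pvF
    rw [hv, add_zero, PySem.Int.mod_eq_emod_of_pos (by omega)]
    exact Int.emod_eq_of_lt h0 h1
  unfold pvDir
  cases fw
  · simp_all
  · simp_all
    omega

-- A's index step is the same function: (j + v + L) % L = (j + v) % L
theorem pvA_step (nums : List Int) (j : Int) (hn : 0 < nums.length) :
    PySem.Int.mod (j + pvVal nums j + (nums.length : Int)) (nums.length : Int) = pvF nums j := by
  unfold pvF
  rw [PySem.Int.mod_eq_emod_of_pos (by exact_mod_cast hn), PySem.Int.mod_eq_emod_of_pos (by exact_mod_cast hn)]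
  conv_lhs => rw [show j + pvVal nums j + (nums.length : Int) = j + pvVal nums j + (nums.length : Int) * 1 by ring]
  simp

theorem pvAWalk_iff (nums : List Int) (fw : Bool) (hn : 0 < nums.length) :
    ∀ (l : Int) (j : Int), 0 ≤ l → l ≤ (nums.length : Int) →
    (pvAWalk nums (nums.length : Int) fw j l = true ↔
      ∀ t : Nat, (t : Int) ≤ (nums.length : Int) - l → pvOk nums fw ((pvF nums)^[t] j)) := by
  intro l j
  fun_induction pvAWalk nums (nums.length : Int) fw j l
  case case1 j l h =>
    intro hl0 hl1
    apply iff_of_false (by simp)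
    intro hall
    have h0 := hall 0 (by omega)
    rw [Function.iterate_zero_apply] at h0
    rw [h0.1] at h
    exact Bool.false_ne_true h
  case case2 j l h1 nextj h2 =>
    intro hl0 hl1
    have hF : nextj = PySem.Int.mod (j + pvVal nums j + (nums.length : Int)) (nums.length : Int) := rfl
    rw [pvA_step nums j hn] at hF
    apply iff_of_false (by simp)
    intro hall
    have h0 := hall 0 (by omega)
    rw [Function.iterate_zero_apply] at h0
    exact h0.2 (hF ▸ h2)
  case case3 j l h1 nextj h2 h3 =>
    intro hl0 hl1
    have hF : nextj = PySem.Int.mod (j + pvVal nums j + (nums.length : Int)) (nums.length : Int) := rfl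
    rw [pvA_step nums j hn] at hF
    apply iff_of_true rfl
    intro t ht
    have ht0 : t = 0 := by omega
    subst ht0
    rw [Function.iterate_zero_apply]
    exact ⟨Bool.eq_false_iff.mpr (fun hc => h1 hc), fun hc => h2 (hF ▸ hc)⟩
  case case4 j l h1 nextj h2 h3 ih =>
    intro hl0 hl1
    have hF : nextj = PySem.Int.mod (j + pvVal nums j + (nums.length : Int)) (nums.length : Int) := rfl
    rw [pvA_step nums j hn] at hF
    rw [ih (by omega) (by omega)]
    constructor
    · intro hall t ht
      cases t with
      | zero =>
        rw [Function.iterate_zero_apply]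
        exact ⟨Bool.eq_false_iff.mpr (fun hc => h1 hc), fun hc => h2 (hF ▸ hc)⟩
      | succ t =>
        have := hall t (by push_cast at ht ⊢; omega)
        rw [Function.iterate_succ_apply] at ⊢
        rw [hF] at this
        exact this
    · intro hall t ht
      have := hall (t + 1) (by push_cast at ht ⊢; omega)
      rw [Function.iterate_succ_apply] at this
      rw [hF]
      exact this

theorem pvA_iff (nums : List Int) :
    circular_array_loop_exists nums = true ↔
      ∃ i : Int, 0 ≤ i ∧ i < (nums.length : Int) ∧
        ∀ t : Nat, (t : Int) ≤ (nums.length : Int) → pvOk nums (pvDir nums i) ((pvF nums)^[t] i) := by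
  unfold circular_array_loop_exists
  rw [List.any_eq_true]
  constructor
  · rintro ⟨i, hmem, hwalk⟩
    rw [PySem.List.mem_pyRange_one] at hmem
    have hn : 0 < nums.length := by omega
    refine ⟨i, hmem.1, hmem.2, ?_⟩
    have := (pvAWalk_iff nums (pvDir nums i) hn 0 i le_rfl (by omega)).mp hwalk
    intro t ht
    exact this t (by omega)
  · rintro ⟨i, h0, h1, hall⟩
    have hn : 0 < nums.length := by omega
    refine ⟨i, PySem.List.mem_pyRange_one.mpr ⟨h0, h1⟩, ?_⟩
    exact (pvAWalk_iff nums (pvDir nums i) hn 0 i le_rfl (by omega)).mpr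
      (fun t ht => hall t (by omega))

theorem pv_surv_to_cycle (nums : List Int) (i : Int) (h0 : 0 ≤ i) (h1 : i < (nums.length : Int))
    (h : ∀ t : Nat, (t : Int) ≤ (nums.length : Int) → pvOk nums (pvDir nums i) ((pvF nums)^[t] i)) :
    pvHasCycle nums := by
  have hn : 0 < nums.length := by omega
  have hrange : ∀ t : Nat, 0 ≤ (pvF nums)^[t] i ∧ (pvF nums)^[t] i < (nums.length : Int) := by
    intro t
    cases t with
    | zero => exact ⟨h0, h1⟩
    | succ t => rw [Function.iterate_succ_apply']; exact pvF_range nums _ hn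
  have aux : ∀ a b : Nat, a < b → b ≤ nums.length →
      (pvF nums)^[a] i = (pvF nums)^[b] i → pvHasCycle nums := by
    intro a b hab hbn heq
    refine ⟨(pvF nums)^[a] i, b - a, (hrange a).1, (hrange a).2, by omega, ?_, ?_⟩
    · rw [← Function.iterate_add_apply, Nat.sub_add_cancel (le_of_lt hab), ← heq]
    · have hdir : pvDir nums ((pvF nums)^[a] i) = pvDir nums i := by
        exact pvOk_dir nums _ _ (hrange a).1 (hrange a).2 (h a (by omega))
      rw [hdir]
      intro t ht
      rw [← Function.iterate_add_apply]
      exact h (t + a) (by omega)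
  have hmap : ∀ t ∈ Finset.range (nums.length + 1),
      (pvF nums)^[t] i ∈ Finset.Ico (0 : Int) (nums.length : Int) := by
    intro t _
    exact Finset.mem_Ico.mpr (hrange t)
  obtain ⟨a, ha, b, hb, hne, heq⟩ :=
    Finset.exists_ne_map_eq_of_card_lt_of_maps_to
      (by rw [Finset.card_range, Int.card_Ico]; omega) hmap
  rw [Finset.mem_range] at ha hb
  rcases Nat.lt_or_ge a b with hlt | hge
  · exact aux a b hlt (by omega) heq
  · exact aux b a (by omega) (by omega) heq.symm

theorem pv_cycle_to_live (nums : List Int) (h : pvHasCycle nums) :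
    ∃ c : Int, 0 ≤ c ∧ c < (nums.length : Int) ∧ pvLiveF nums (pvDir nums c) c := by
  obtain ⟨c, k, h0, h1, hk, hfix, hok⟩ := h
  refine ⟨c, h0, h1, ?_⟩
  intro m
  have hp : Function.IsPeriodicPt (pvF nums) k c := hfix
  rw [← hp.iterate_mod_apply m]
  exact hok (m % k) (Nat.mod_lt _ (by omega))

theorem pvA_true_iff (nums : List Int) :
    circular_array_loop_exists nums = true ↔ pvHasCycle nums := by
  rw [pvA_iff]
  constructor
  · rintro ⟨i, h0, h1, hall⟩
    exact pv_surv_to_cycle nums i h0 h1 hall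
  · intro hcyc
    obtain ⟨c, h0, h1, hlive⟩ := pv_cycle_to_live nums hcyc
    exact ⟨c, h0, h1, fun t _ => hlive t⟩

-- path length bound: a nodup list of integers in [0, L) has at most L elements
theorem pv_path_len (L : Int) (path : List Int) (hnd : path.Nodup)
    (hmem : ∀ p ∈ path, 0 ≤ p ∧ p < L) : path.length ≤ L.toNat := by
  have hcard : path.toFinset.card = path.length := List.toFinset_card_of_nodup hnd
  have hsub : path.toFinset ⊆ Finset.Ico (0 : Int) L := by
    intro x hx
    rw [List.mem_toFinset] at hx
    exact Finset.mem_Ico.mpr (hmem x hx)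
  have := Finset.card_le_card hsub
  rw [hcard, Int.card_Ico] at this
  omega

-- a node whose walk runs (all checks passing) into a break point is dead
theorem pv_dead_of_trail (nums : List Int) (fw : Bool) (p j : Int)
    (hp0 : 0 ≤ p) (hp1 : p < (nums.length : Int)) (d : Nat) (hd : 1 ≤ d)
    (hfd : (pvF nums)^[d] p = j) (hok : ∀ t < d, pvOk nums fw ((pvF nums)^[t] p))
    (hbad : ¬ pvOk nums fw j ∨ (0 ≤ j ∧ j < (nums.length : Int) ∧ pvDead nums j)) :
    pvDead nums p := by
  have hdirp : pvDir nums p = fw := by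
    have := hok 0 hd
    rw [Function.iterate_zero_apply] at this
    exact pvOk_dir nums fw p hp0 hp1 this
  unfold pvDead
  rw [hdirp]
  intro hlive
  rcases hbad with hnot | ⟨hj0, hj1, hdead⟩
  · exact hnot (hfd ▸ hlive d)
  · by_cases hdj : pvDir nums j = fw
    · apply hdead
      rw [hdj]
      intro m
      have := hlive (m + d)
      rw [Function.iterate_add_apply, hfd] at this
      exact this
    · exact hdj (pvOk_dir nums fw j hj0 hj1 (hfd ▸ hlive d))

-- B walk soundness for the visited set: a false-returning walk only marks dead nodes
theorem pvBWalk_false (nums : List Int) (fw : Bool) (hn : 0 < nums.length) :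
    ∀ (fuel : Nat) (visited path : PySem.Set Int) (j : Int),
    (∀ v ∈ visited, 0 ≤ v ∧ v < (nums.length : Int) ∧ (pvDead nums v ∨ v ∈ path)) →
    path.Nodup →
    (∀ p ∈ path, 0 ≤ p ∧ p < (nums.length : Int) ∧
      ∃ d : Nat, 1 ≤ d ∧ (pvF nums)^[d] p = j ∧ ∀ t < d, pvOk nums fw ((pvF nums)^[t] p)) →
    0 ≤ j → j < (nums.length : Int) →
    nums.length + 1 ≤ fuel + path.length →
    (pvBWalk nums (nums.length : Int) fw visited path j fuel).1 = true ∨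
      (∀ v ∈ (pvBWalk nums (nums.length : Int) fw visited path j fuel).2,
        0 ≤ v ∧ v < (nums.length : Int) ∧ pvDead nums v) := by
  intro fuel
  induction fuel with
  | zero =>
    intro visited path j hvis hnd hpath hj0 hj1 hfuel
    have := pv_path_len (nums.length : Int) path hnd (fun p hp => ⟨(hpath p hp).1, (hpath p hp).2.1⟩)
    omega
  | succ fuel ih =>
    intro visited path j hvis hnd hpath hj0 hj1 hfuel
    -- the dead-visited conclusion for the four break branches
    have hbreak : (¬ pvOk nums fw j ∨ (0 ≤ j ∧ j < (nums.length : Int) ∧ pvDead nums j)) →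
        ∀ v ∈ visited, 0 ≤ v ∧ v < (nums.length : Int) ∧ pvDead nums v := by
      intro hbad v hv
      obtain ⟨h0, h1, hvd⟩ := hvis v hv
      refine ⟨h0, h1, ?_⟩
      rcases hvd with hvd | hvp
      · exact hvd
      · obtain ⟨-, -, d, hd, hfd, hoks⟩ := hpath v hvp
        exact pv_dead_of_trail nums fw v j h0 h1 d hd hfd hoks hbad
    rw [pvBWalk]
    by_cases hp : PySem.Set.contains path j = true
    · simp only [hp, if_true]
      exact Or.inl trivial
    · have hp2 : PySem.Set.contains path j = false := by rwa [Bool.not_eq_true] at hp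
      have hjnp : j ∉ path := fun h => hp ((PySem.Set.contains_iff path j).mpr h)
      by_cases hv : PySem.Set.contains visited j = true
      · simp only [hp2, Bool.false_eq_true, if_false, hv, if_true]
        refine Or.inr ?_
        intro v hvm
        refine hbreak ?_ v hvm
        have hjv : j ∈ visited := (PySem.Set.contains_iff visited j).mp hv
        obtain ⟨-, -, hd⟩ := hvis j hjv
        rcases hd with hd | hjp
        · exact Or.inr ⟨hj0, hj1, hd⟩
        · exact absurd hjp hjnp
      · have hv2 : PySem.Set.contains visited j = false := by rwa [Bool.not_eq_true] at hv
        by_cases hs : ((fw && decide (pvVal nums j < 0)) || (!fw && decide (0 < pvVal nums j))) = true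
        · simp only [hp2, hv2, Bool.false_eq_true, if_false, hs, if_true]
          exact Or.inr (hbreak (Or.inl (fun hok => by rw [hok.1] at hs; exact Bool.false_ne_true hs)))
        · have hs2 : ((fw && decide (pvVal nums j < 0)) || (!fw && decide (0 < pvVal nums j))) = false := by
            rwa [Bool.not_eq_true] at hs
          have hFj : PySem.Int.mod (j + pvVal nums j) (nums.length : Int) = pvF nums j := rfl
          by_cases hx : pvF nums j = j
          · simp only [hp2, hv2, hs2, Bool.false_eq_true, if_false, hFj, hx, if_true]
            exact Or.inr (hbreak (Or.inl (fun hok => hok.2 hx)))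
          · simp only [hp2, hv2, hs2, Bool.false_eq_true, if_false, hFj, if_neg hx]
            have hokj : pvOk nums fw j := ⟨hs2, hx⟩
            have hadd : PySem.Set.add path j = path ++ [j] := by
              unfold PySem.Set.add
              rw [if_neg hp]
            have hrange := pvF_range nums j hn
            apply ih (PySem.Set.add visited j) (PySem.Set.add path j) (pvF nums j)
            · intro v hvmem
              rw [PySem.Set.mem_add visited j v] at hvmem
              rcases hvmem with hvmem | rfl
              · obtain ⟨h0, h1, hd⟩ := hvis v hvmem
                refine ⟨h0, h1, ?_⟩
                rcases hd with hd | hvp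
                · exact Or.inl hd
                · exact Or.inr ((PySem.Set.mem_add path j v).mpr (Or.inl hvp))
              · exact ⟨hj0, hj1, Or.inr ((PySem.Set.mem_add path _ _).mpr (Or.inr rfl))⟩
            · exact PySem.Set.nodup_add path j hnd
            · intro q hq
              rw [PySem.Set.mem_add path j q] at hq
              rcases hq with hq | rfl
              · obtain ⟨h0, h1, d, hd, hfd, hoks⟩ := hpath q hq
                refine ⟨h0, h1, d + 1, by omega, ?_, ?_⟩
                · rw [Function.iterate_succ_apply', hfd]
                · intro t ht
                  rcases Nat.lt_or_ge t d with ht' | ht'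
                  · exact hoks t ht'
                  · have : t = d := by omega
                    subst this
                    rw [hfd]
                    exact hokj
              · refine ⟨hj0, hj1, 1, le_rfl, by rw [Function.iterate_one], ?_⟩
                intro t ht
                have : t = 0 := by omega
                subst this
                rw [Function.iterate_zero_apply]
                exact hokj
            · exact hrange.1
            · exact hrange.2
            · rw [hadd]
              simp only [List.length_append, List.length_singleton]
              omega

-- B walk completeness: started on a live node it reports True
theorem pvBWalk_true (nums : List Int) (fw : Bool) (hn : 0 < nums.length) :
    ∀ (fuel : Nat) (visited path : PySem.Set Int) (j : Int),
    pvLiveF nums fw j →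
    (∀ v ∈ visited, 0 ≤ v ∧ v < (nums.length : Int) ∧ (pvDead nums v ∨ v ∈ path)) →
    path.Nodup →
    (∀ p ∈ path, 0 ≤ p ∧ p < (nums.length : Int)) →
    0 ≤ j → j < (nums.length : Int) →
    nums.length + 1 ≤ fuel + path.length →
    (pvBWalk nums (nums.length : Int) fw visited path j fuel).1 = true := by
  intro fuel
  induction fuel with
  | zero =>
    intro visited path j hlive hvis hnd hpathr hj0 hj1 hfuel
    have := pv_path_len (nums.length : Int) path hnd hpathr
    omega
  | succ fuel ih =>
    intro visited path j hlive hvis hnd hpathr hj0 hj1 hfuel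
    have hokj : pvOk nums fw j := by
      have := hlive 0
      rwa [Function.iterate_zero_apply] at this
    have hdirj : pvDir nums j = fw := pvOk_dir nums fw j hj0 hj1 hokj
    rw [pvBWalk]
    by_cases hp : PySem.Set.contains path j = true
    · simp only [hp, if_true]
    · have hp2 : PySem.Set.contains path j = false := by rwa [Bool.not_eq_true] at hp
      have hjnp : j ∉ path := fun h => hp ((PySem.Set.contains_iff path j).mpr h)
      have hv2 : PySem.Set.contains visited j = false := by
        rw [Bool.not_eq_true] at *
        by_contra hc
        rw [Bool.not_eq_false] at hc
        obtain ⟨-, -, hd⟩ := hvis j ((PySem.Set.contains_iff visited j).mp hc)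
        rcases hd with hd | hjp
        · apply hd
          rw [hdirj]
          exact hlive
        · exact hjnp hjp
      have hFj : PySem.Int.mod (j + pvVal nums j) (nums.length : Int) = pvF nums j := rfl
      simp only [hp2, hv2, Bool.false_eq_true, if_false, hokj.1, hFj, if_neg hokj.2]
      have hadd : PySem.Set.add path j = path ++ [j] := by
        unfold PySem.Set.add
        rw [if_neg hp]
      have hrange := pvF_range nums j hn
      apply ih (PySem.Set.add visited j) (PySem.Set.add path j) (pvF nums j)
      · intro m
        have := hlive (m + 1)
        rwa [Function.iterate_succ_apply] at this
      · intro v hvmem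
        rw [PySem.Set.mem_add visited j v] at hvmem
        rcases hvmem with hvmem | rfl
        · obtain ⟨h0, h1, hd⟩ := hvis v hvmem
          refine ⟨h0, h1, ?_⟩
          rcases hd with hd | hvp
          · exact Or.inl hd
          · exact Or.inr ((PySem.Set.mem_add path _ _).mpr (Or.inl hvp))
        · exact ⟨hj0, hj1, Or.inr ((PySem.Set.mem_add path _ _).mpr (Or.inr rfl))⟩
      · exact PySem.Set.nodup_add path j hnd
      · intro q hq
        rw [PySem.Set.mem_add path j q] at hq
        rcases hq with hq | rfl
        · exact hpathr q hq
        · exact ⟨hj0, hj1⟩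
      · exact hrange.1
      · exact hrange.2
      · rw [hadd]
        simp only [List.length_append, List.length_singleton]
        omega

-- B walk True only on a genuine cycle
theorem pvBWalk_cycle (nums : List Int) (fw : Bool) (hn : 0 < nums.length) :
    ∀ (fuel : Nat) (visited path : PySem.Set Int) (j : Int),
    (∀ p ∈ path, 0 ≤ p ∧ p < (nums.length : Int) ∧
      ∃ d : Nat, 1 ≤ d ∧ (pvF nums)^[d] p = j ∧ ∀ t < d, pvOk nums fw ((pvF nums)^[t] p)) →
    0 ≤ j → j < (nums.length : Int) →
    (pvBWalk nums (nums.length : Int) fw visited path j fuel).1 = true →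
    pvHasCycle nums := by
  intro fuel
  induction fuel with
  | zero =>
    intro visited path j hpath hj0 hj1 htrue
    exact absurd htrue (by rw [pvBWalk]; exact Bool.false_ne_true)
  | succ fuel ih =>
    intro visited path j hpath hj0 hj1 htrue
    rw [pvBWalk] at htrue
    by_cases hp : PySem.Set.contains path j = true
    · obtain ⟨h0, h1, d, hd, hfd, hoks⟩ := hpath j ((PySem.Set.contains_iff path j).mp hp)
      have hdirj : pvDir nums j = fw := by
        have := hoks 0 hd
        rw [Function.iterate_zero_apply] at this
        exact pvOk_dir nums fw j hj0 hj1 this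
      exact ⟨j, d, hj0, hj1, hd, hfd, by rw [hdirj]; exact hoks⟩
    · have hp2 : PySem.Set.contains path j = false := by rwa [Bool.not_eq_true] at hp
      simp only [hp2, Bool.false_eq_true, if_false] at htrue
      by_cases hv : PySem.Set.contains visited j = true
      · rw [if_pos hv] at htrue
        exact absurd htrue Bool.false_ne_true
      · have hv2 : PySem.Set.contains visited j = false := by rwa [Bool.not_eq_true] at hv
        simp only [hv2, Bool.false_eq_true, if_false] at htrue
        by_cases hs : ((fw && decide (pvVal nums j < 0)) || (!fw && decide (0 < pvVal nums j))) = true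
        · rw [if_pos hs] at htrue
          exact absurd htrue Bool.false_ne_true
        · have hs2 : ((fw && decide (pvVal nums j < 0)) || (!fw && decide (0 < pvVal nums j))) = false := by
            rwa [Bool.not_eq_true] at hs
          simp only [hs2, Bool.false_eq_true, if_false] at htrue
          have hFj : PySem.Int.mod (j + pvVal nums j) (nums.length : Int) = pvF nums j := rfl
          by_cases hx : pvF nums j = j
          · rw [hFj, if_pos hx] at htrue
            exact absurd htrue Bool.false_ne_true
          · rw [hFj, if_neg hx] at htrue
            have hokj : pvOk nums fw j := ⟨hs2, hx⟩
            have hrange := pvF_range nums j hn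
            apply ih (PySem.Set.add visited j) (PySem.Set.add path j) (pvF nums j) ?_ hrange.1 hrange.2 htrue
            intro q hq
            rw [PySem.Set.mem_add path j q] at hq
            rcases hq with hq | rfl
            · obtain ⟨h0, h1, d, hd, hfd, hoks⟩ := hpath q hq
              refine ⟨h0, h1, d + 1, by omega, ?_, ?_⟩
              · rw [Function.iterate_succ_apply', hfd]
              · intro t ht
                rcases Nat.lt_or_ge t d with ht' | ht'
                · exact hoks t ht'
                · have : t = d := by omega
                  subst this
                  rw [hfd]
                  exact hokj
            · refine ⟨hj0, hj1, 1, le_rfl, by rw [Function.iterate_one], ?_⟩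
              intro t ht
              have : t = 0 := by omega
              subst this
              rw [Function.iterate_zero_apply]
              exact hokj

-- the outer loop returns True only if a same-direction cycle exists
theorem pvBOuter_cycle (nums : List Int) :
    ∀ (is : List Int) (visited : PySem.Set Int),
    (∀ i ∈ is, 0 ≤ i ∧ i < (nums.length : Int)) →
    pvBOuter nums (nums.length : Int) is visited = true → pvHasCycle nums := by
  intro is
  induction is with
  | nil => intro visited _ h; rw [pvBOuter] at h; exact absurd h Bool.false_ne_true
  | cons i rest ih =>
    intro visited hrange h
    rw [pvBOuter] at h
    by_cases hv : PySem.Set.contains visited i = true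
    · rw [if_pos hv] at h
      exact ih visited (fun q hq => hrange q (List.mem_cons_of_mem i hq)) h
    · rw [if_neg hv] at h
      have hi := hrange i List.mem_cons_self
      have hn : 0 < nums.length := by omega
      by_cases hw : (pvBWalk nums (nums.length : Int) (decide (0 < pvVal nums i)) visited
          PySem.Set.empty i (nums.length + 1)).1 = true
      · exact pvBWalk_cycle nums _ hn _ visited PySem.Set.empty i
          (fun p hp => absurd hp (List.not_mem_nil)) hi.1 hi.2 hw
      · rw [if_neg hw] at h
        exact ih _ (fun q hq => hrange q (List.mem_cons_of_mem i hq)) h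

-- the outer loop finds a live start as long as the visited set holds only dead nodes
theorem pvBOuter_complete (nums : List Int) :
    ∀ (is : List Int) (visited : PySem.Set Int),
    (∀ i ∈ is, 0 ≤ i ∧ i < (nums.length : Int)) →
    (∀ v ∈ visited, 0 ≤ v ∧ v < (nums.length : Int) ∧ pvDead nums v) →
    (∃ c : Int, 0 ≤ c ∧ c < (nums.length : Int) ∧ pvLiveF nums (pvDir nums c) c ∧ c ∈ is) →
    pvBOuter nums (nums.length : Int) is visited = true := by
  intro is
  induction is with
  | nil => rintro visited _ _ ⟨c, -, -, -, hc⟩; exact absurd hc (List.not_mem_nil)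
  | cons i rest ih =>
    rintro visited hrange hvis ⟨c, hc0, hc1, hclive, hcmem⟩
    have hn : 0 < nums.length := by omega
    rw [pvBOuter]
    rcases List.mem_cons.mp hcmem with rfl | hcrest
    · have hv2 : PySem.Set.contains visited c = false := by
        rw [Bool.eq_false_iff]
        intro hv
        obtain ⟨-, -, hdead⟩ := hvis c ((PySem.Set.contains_iff visited c).mp hv)
        exact hdead hclive
      rw [if_neg (by rw [hv2]; exact Bool.false_ne_true)]
      have hw : (pvBWalk nums (nums.length : Int) (decide (0 < pvVal nums c)) visited
          PySem.Set.empty c (nums.length + 1)).1 = true := by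
        apply pvBWalk_true nums _ hn _ visited PySem.Set.empty c hclive
        · intro v hv
          obtain ⟨h0, h1, hd⟩ := hvis v hv
          exact ⟨h0, h1, Or.inl hd⟩
        · exact List.nodup_nil
        · intro p hp; exact absurd hp (List.not_mem_nil)
        · exact hc0
        · exact hc1
        · simp
      rw [if_pos hw]
    · by_cases hv : PySem.Set.contains visited i = true
      · rw [if_pos hv]
        exact ih visited (fun q hq => hrange q (List.mem_cons_of_mem i hq)) hvis
          ⟨c, hc0, hc1, hclive, hcrest⟩
      · rw [if_neg hv]
        have hi := hrange i List.mem_cons_self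
        by_cases hw : (pvBWalk nums (nums.length : Int) (decide (0 < pvVal nums i)) visited
            PySem.Set.empty i (nums.length + 1)).1 = true
        · rw [if_pos hw]
        · rw [if_neg hw]
          have hsound := pvBWalk_false nums (decide (0 < pvVal nums i)) hn (nums.length + 1) visited PySem.Set.empty i
            (fun v hvm => ⟨(hvis v hvm).1, (hvis v hvm).2.1, Or.inl (hvis v hvm).2.2⟩)
            List.nodup_nil (fun p hp => absurd hp (List.not_mem_nil)) hi.1 hi.2 (by simp)
          rcases hsound with hsound | hsound
          · exact absurd hsound hw
          · exact ih _ (fun q hq => hrange q (List.mem_cons_of_mem i hq)) hsound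
              ⟨c, hc0, hc1, hclive, hcrest⟩

theorem pvB_true_iff (nums : List Int) :
    circular_array_loop_exists_alt nums = true ↔ pvHasCycle nums := by
  unfold circular_array_loop_exists_alt
  constructor
  · intro h
    exact pvBOuter_cycle nums _ PySem.Set.empty
      (fun i hi => PySem.List.mem_pyRange_one.mp hi) h
  · intro hcyc
    obtain ⟨c, h0, h1, hlive⟩ := pv_cycle_to_live nums hcyc
    apply pvBOuter_complete nums _ PySem.Set.empty
      (fun i hi => PySem.List.mem_pyRange_one.mp hi)
      (fun v hv => absurd hv (List.not_mem_nil))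
    exact ⟨c, h0, h1, hlive, PySem.List.mem_pyRange_one.mpr ⟨h0, h1⟩⟩

-- ===== VERDICT (by name: the statement is the Claim_ definition above) =====
theorem circular_array_loop_exists_spec : Claim_equal_circular_array_loop_exists := by
  intro nums _
  unfold Spec_circular_array_loop_exists
  have := (pvA_true_iff nums).trans (pvB_true_iff nums).symm
  cases hA : circular_array_loop_exists nums <;> cases hB : circular_array_loop_exists_alt nums <;> simp_all
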